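-- pv_equiv track=rewrite | github.com/jenihuang/hb_challenges | MEDIUM/check/check.py | check_rdiagonal
-- ===== SOURCE A (Python) =====
-- def check_rdiagonal(king, queen):
--     positions = ['A', 'B', 'C', 'D', 'E', 'F', 'G', 'H']
--     q_letter = queen[0]
--     q_num = int(queen[1])
--     letter_index = positions.index(queen[0])
--
--     num = q_num
--     for i in range(letter_index + 1, 8):
--         letter = positions[i]
--         num -= 1
--         if king == (letter + str(num)):
--             return True
--
--     num = q_num
--     for i in range(letter_index - 1, -1, -1):
--         letter = positions[i]
--         num += 1
--         if king == (letter + str(num)):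
--             return True
--
--     return False
-- ===== SOURCE B (Python) =====
-- def check_rdiagonal(king, queen):
--     positions = 'ABCDEFGH'
--     qi = positions.index(queen[0])
--     q_num = int(queen[1])
--     if not king or king[0] not in positions:
--         return False
--     j = positions.index(king[0])
--     return j != qi and king == king[0] + str(q_num - (j - qi))
-- ===== Notes on version B (the rewrite author's own statement) =====
-- stated objective: simpler
-- what changed: Replaces A's two directional walks along the diagonal with a single closed-form check: locate the king's column, and compare king to the one candidate diagonal square for that column.
import Mathlib
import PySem

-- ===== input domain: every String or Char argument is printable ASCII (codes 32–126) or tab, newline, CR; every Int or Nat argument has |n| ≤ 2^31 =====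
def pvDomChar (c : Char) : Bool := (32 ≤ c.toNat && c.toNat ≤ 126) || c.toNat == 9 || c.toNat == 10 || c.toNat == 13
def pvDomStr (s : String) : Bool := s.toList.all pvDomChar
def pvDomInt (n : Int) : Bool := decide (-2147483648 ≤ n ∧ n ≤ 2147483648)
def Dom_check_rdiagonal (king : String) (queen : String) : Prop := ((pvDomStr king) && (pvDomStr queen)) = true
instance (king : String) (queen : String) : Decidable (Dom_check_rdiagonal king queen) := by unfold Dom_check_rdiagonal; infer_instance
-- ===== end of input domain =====

-- B replaces A's two directional walks along the diagonal with a single closed-form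
-- candidate-square comparison for the king's own column (objective: simpler).

-- ===== PORT A =====
-- Python strings are modelled as List Char throughout (PySem convention).
def pvPositionsA : List (List Char) := [['A'], ['B'], ['C'], ['D'], ['E'], ['F'], ['G'], ['H']]

-- first loop: for i in range(letter_index+1, 8): num -= 1; if king == positions[i] + str(num): return True
def pvLoopR (king : List Char) (idxs : List Int) (num : Int) : Bool :=
  match idxs with
  | [] => false
  | i :: rest =>
    let letter := (PySem.List.pyGet? pvPositionsA i).getD []
    let num' := num - 1
    if king = letter ++ PySem.Int.toChars num' then true else pvLoopR king rest num'

-- second loop: for i in range(letter_index-1, -1, -1): num += 1; if king == positions[i] + str(num): return True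
def pvLoopL (king : List Char) (idxs : List Int) (num : Int) : Bool :=
  match idxs with
  | [] => false
  | i :: rest =>
    let letter := (PySem.List.pyGet? pvPositionsA i).getD []
    let num' := num + 1
    if king = letter ++ PySem.Int.toChars num' then true else pvLoopL king rest num'

def check_rdiagonal (king : String) (queen : String) : Bool :=
  let kingL := king.toList
  let q_num : Int := (PySem.Int.ofChars? [(PySem.List.pyGet? queen.toList 1).getD ' ']).getD 0
  let letter_index : Int :=
    ((PySem.List.index? pvPositionsA [(PySem.List.pyGet? queen.toList 0).getD ' ']).map Int.ofNat).getD 0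
  pvLoopR kingL (PySem.List.pyRange (letter_index + 1) 8 1) q_num
    || pvLoopL kingL (PySem.List.pyRange (letter_index - 1) (-1) (-1)) q_num

-- ===== PORT B =====
def check_rdiagonal_alt (king : String) (queen : String) : Bool :=
  let positions : List Char := ['A', 'B', 'C', 'D', 'E', 'F', 'G', 'H']
  let qi : Int := ((PySem.List.index? positions ((PySem.List.pyGet? queen.toList 0).getD ' ')).map Int.ofNat).getD 0
  let q_num : Int := (PySem.Int.ofChars? [(PySem.List.pyGet? queen.toList 1).getD ' ']).getD 0
  match king.toList with
  | [] => false
  | c :: _ =>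
    match PySem.List.index? positions c with
    | none => false
    | some j =>
      decide ((j : Int) ≠ qi) && decide (king.toList = c :: PySem.Int.toChars (q_num - ((j : Int) - qi)))

-- ===== PRECONDITION & SPEC =====
-- Pre_ excludes exactly the inputs where the Python A raises: queen shorter than 2 characters
-- (IndexError), queen[0] not a column letter A-H (ValueError from .index), or queen[1] not a
-- decimal digit (ValueError from int()).
def Pre_check_rdiagonal (king : String) (queen : String) : Prop :=
  2 ≤ queen.toList.length ∧
  queen.toList.getD 0 ' ' ∈ (['A', 'B', 'C', 'D', 'E', 'F', 'G', 'H'] : List Char) ∧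
  '0' ≤ queen.toList.getD 1 ' ' ∧ queen.toList.getD 1 ' ' ≤ '9'
instance (king : String) (queen : String) : Decidable (Pre_check_rdiagonal king queen) := by unfold Pre_check_rdiagonal; infer_instance

def pvWitness_check_rdiagonal : String × String := ("E4", "D5")

def Spec_check_rdiagonal (king : String) (queen : String) (out : Bool) : Prop := out = check_rdiagonal_alt king queen
instance (king : String) (queen : String) (out : Bool) : Decidable (Spec_check_rdiagonal king queen out) := by unfold Spec_check_rdiagonal; infer_instance

-- ===== CLAIM (what is proved, stated in full; the proofs are below) =====
def Claim_equal_check_rdiagonal : Prop := ∀ (king : String) (queen : String), Dom_check_rdiagonal king queen → Pre_check_rdiagonal king queen → Spec_check_rdiagonal king queen (check_rdiagonal king queen)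

-- ===== LEMMAS AND PROOFS =====

-- core equivalence: for any column index 0 ≤ li < 8, A's two walks equal B's single candidate check
set_option maxHeartbeats 1000000 in
lemma pv_main (kL : List Char) (qn li : Int) (h0 : 0 ≤ li) (h8 : li < 8) :
  (pvLoopR kL (PySem.List.pyRange (li + 1) 8 1) qn
    || pvLoopL kL (PySem.List.pyRange (li - 1) (-1) (-1)) qn)
  = (match kL with
    | [] => false
    | c :: _ =>
      match PySem.List.index? (['A','B','C','D','E','F','G','H'] : List Char) c with
      | none => false
      | some j => decide ((j : Int) ≠ li) && decide (kL = c :: PySem.Int.toChars (qn - ((j : Int) - li)))) := by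
  interval_cases li <;>
    (norm_num [PySem.List.pyRange_one_cons, PySem.List.pyRange_one_eq_nil,
       PySem.List.pyRange_neg_one_cons, PySem.List.pyRange_neg_one_eq_nil]
     rcases kL with _ | ⟨c, kr⟩
     · simp [pvLoopR, pvLoopL, pvPositionsA, PySem.List.pyGet?, PySem.List.pyIdx?]
     · by_cases hc : c ∈ (['A','B','C','D','E','F','G','H'] : List Char)
       · fin_cases hc <;>
           simp [pvLoopR, pvLoopL, pvPositionsA, PySem.List.pyGet?, PySem.List.pyIdx?,
             List.idxOf?_cons, List.cons.injEq] <;>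
           ring_nf
       · have hnone : PySem.List.index? (['A','B','C','D','E','F','G','H'] : List Char) c = none :=
           (PySem.List.index?_eq_none_iff _ _).mpr hc
         simp only [PySem.List.index?_eq_idxOf?] at hnone
         simp only [List.mem_cons] at hc
         push_neg at hc
         obtain ⟨h1,h2,h3,h4,h5,h6,h7,h8⟩ := hc
         simp [pvLoopR, pvLoopL, pvPositionsA, PySem.List.pyGet?, PySem.List.pyIdx?, hnone,
           List.cons.injEq, h1,h2,h3,h4,h5,h6,h7,h8])

-- ===== VERDICT (by name: the statement is the Claim_ definition above) =====
theorem check_rdiagonal_spec : Claim_equal_check_rdiagonal := by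
  intro king queen _ hpre
  obtain ⟨hlen, hc, _, _⟩ := hpre
  unfold Spec_check_rdiagonal check_rdiagonal check_rdiagonal_alt
  rcases ht : queen.toList with _ | ⟨c, t⟩
  · rw [ht] at hlen; simp at hlen
  rcases t with _ | ⟨d, r⟩
  · rw [ht] at hlen; simp at hlen
  rw [ht] at hc
  simp only [List.getD_cons_zero] at hc
  have g0 : PySem.List.pyGet? (c :: d :: r) 0 = some c := by
    simp [PySem.List.pyGet?_zero]
  have g1 : PySem.List.pyGet? (c :: d :: r) 1 = some d := by
    have : ((1 : Nat) : Int) = (1 : Int) := by norm_num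
    rw [← this, PySem.List.pyGet?_natCast]
    simp
  simp only [g0, g1, Option.getD_some]
  fin_cases hc <;>
    (refine pv_main king.toList _ _ ?_ ?_ <;> decide)
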